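-- pv_equiv track=rewrite | github.com/Rashpinder1985/Active-ClassTeacher-Agent | classroom_report/config.py | normalize_homework_levels
-- ===== SOURCE A (Python) =====
-- HOMEWORK_LEVEL_ORDER: tuple[str, ...] = ("Support", "Core", "Extension")
--
-- def normalize_homework_levels(levels: list[str] | None) -> list[str]:
--     """Return selected levels in canonical order: Support, Core, Extension."""
--     if not levels:
--         return list(HOMEWORK_LEVEL_ORDER)
--     mapping = {"support": "Support", "core": "Core", "extension": "Extension"}
--     seen: list[str] = []
--     for raw in levels:
--         key = str(raw).strip().lower()
--         if key in mapping:
--             c = mapping[key]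
--             if c not in seen:
--                 seen.append(c)
--     if not seen:
--         return list(HOMEWORK_LEVEL_ORDER)
--     idx = {name: i for i, name in enumerate(HOMEWORK_LEVEL_ORDER)}
--     return sorted(seen, key=lambda x: idx[x])
-- ===== SOURCE B (Python) =====
-- HOMEWORK_LEVEL_ORDER: tuple[str, ...] = ("Support", "Core", "Extension")
--
-- def normalize_homework_levels(levels):
--     """Return selected levels in canonical order: Support, Core, Extension."""
--     if not levels:
--         return list(HOMEWORK_LEVEL_ORDER)
--     mapping = {"support": "Support", "core": "Core", "extension": "Extension"}
--     present = set()
--     for raw in levels: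
--         key = str(raw).strip().lower()
--         if key in mapping:
--             present.add(mapping[key])
--     if not present:
--         return list(HOMEWORK_LEVEL_ORDER)
--     return [name for name in HOMEWORK_LEVEL_ORDER if name in present]
-- ===== Notes on version B (the rewrite author's own statement) =====
-- stated objective: idiomatic
-- what changed: B collects the recognized canonical names into a set and emits them by filtering the fixed canonical tuple by membership, eliminating A's ordered dedup list, index table and key-sort.
import Mathlib
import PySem

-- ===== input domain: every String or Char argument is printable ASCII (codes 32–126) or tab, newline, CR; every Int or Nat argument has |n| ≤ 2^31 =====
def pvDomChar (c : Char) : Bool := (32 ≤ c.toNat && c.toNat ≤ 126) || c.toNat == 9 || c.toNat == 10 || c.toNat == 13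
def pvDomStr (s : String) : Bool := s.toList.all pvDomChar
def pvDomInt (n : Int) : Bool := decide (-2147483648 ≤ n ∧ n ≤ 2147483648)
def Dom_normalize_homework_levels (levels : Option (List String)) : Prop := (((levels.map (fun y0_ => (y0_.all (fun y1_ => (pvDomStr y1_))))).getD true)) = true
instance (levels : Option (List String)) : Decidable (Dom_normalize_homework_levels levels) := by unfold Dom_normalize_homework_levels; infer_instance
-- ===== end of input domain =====

-- B replaces A's ordered dedup list + index table + key-sort with a set of present
-- names filtered through the fixed canonical tuple (objective: more idiomatic).

-- ===== PORT A =====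
def nhlOrder : List String := ["Support", "Core", "Extension"]

def nhlMapping : PySem.Dict String String :=
  PySem.Dict.mk [("support", "Support"), ("core", "Core"), ("extension", "Extension")]

-- idx = {name: i for i, name in enumerate(HOMEWORK_LEVEL_ORDER)}
def nhlIdx : PySem.Dict String Int := PySem.Dict.mk [("Support", 0), ("Core", 1), ("Extension", 2)]

def normalize_homework_levels (levels : Option (List String)) : List String :=
  match levels with
  | none => nhlOrder
  | some ls =>
    if ls = [] then nhlOrder
    else
      let seen : List String := ls.foldl (fun seen raw =>
        let key := PySem.Str.lower (PySem.Str.strip raw)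
        match PySem.Dict.get? nhlMapping key with
        | some c => if c ∈ seen then seen else seen ++ [c]
        | none => seen) []
      if seen = [] then nhlOrder
      -- idx[x]: every element of seen is a value of nhlMapping, hence a key of nhlIdx,
      -- so the getD default is never used and the port is exact.
      else PySem.List.sorted seen (fun x => (PySem.Dict.get? nhlIdx x).getD 0) false

-- ===== PORT B =====
def normalize_homework_levels_alt (levels : Option (List String)) : List String :=
  match levels with
  | none => nhlOrder
  | some ls =>
    if ls = [] then nhlOrder
    else
      let present : PySem.Set String := ls.foldl (fun pres raw =>
        let key := PySem.Str.lower (PySem.Str.strip raw)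
        match PySem.Dict.get? nhlMapping key with
        | some c => PySem.Set.add pres c
        | none => pres) PySem.Set.empty
      if PySem.Set.len present = 0 then nhlOrder
      else nhlOrder.filter (fun name => PySem.Set.contains present name)

-- ===== PRECONDITION & SPEC =====
def Spec_normalize_homework_levels (levels : Option (List String)) (out : List String) : Prop := out = normalize_homework_levels_alt levels
instance (levels : Option (List String)) (out : List String) : Decidable (Spec_normalize_homework_levels levels out) := by unfold Spec_normalize_homework_levels; infer_instance

-- ===== CLAIM (what is proved, stated in full; the proofs are below) =====
def Claim_equal_normalize_homework_levels : Prop := ∀ (levels : Option (List String)), Dom_normalize_homework_levels levels → Spec_normalize_homework_levels levels (normalize_homework_levels levels)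

-- ===== LEMMAS AND PROOFS =====

-- the 16 lists the accumulator can ever be (ordered dedup lists over the three names)
def nhlGood (s : List String) : Prop :=
  s = [] ∨ s = ["Support"] ∨ s = ["Core"] ∨ s = ["Extension"] ∨
  s = ["Support", "Core"] ∨ s = ["Core", "Support"] ∨
  s = ["Support", "Extension"] ∨ s = ["Extension", "Support"] ∨
  s = ["Core", "Extension"] ∨ s = ["Extension", "Core"] ∨
  s = ["Support", "Core", "Extension"] ∨ s = ["Support", "Extension", "Core"] ∨
  s = ["Core", "Support", "Extension"] ∨ s = ["Core", "Extension", "Support"] ∨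
  s = ["Extension", "Support", "Core"] ∨ s = ["Extension", "Core", "Support"]

lemma nhlMapping_get? (k : String) :
    PySem.Dict.get? nhlMapping k = none ∨ PySem.Dict.get? nhlMapping k = some "Support" ∨
    PySem.Dict.get? nhlMapping k = some "Core" ∨ PySem.Dict.get? nhlMapping k = some "Extension" := by
  unfold nhlMapping
  rw [PySem.Dict.get?_mk_cons, PySem.Dict.get?_mk_cons, PySem.Dict.get?_mk_cons]
  split_ifs
  · exact Or.inr (Or.inl rfl)
  · exact Or.inr (Or.inr (Or.inl rfl))
  · exact Or.inr (Or.inr (Or.inr rfl))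
  · exact Or.inl rfl

lemma nhl_step_eq (s : List String) (raw : String) :
    (match PySem.Dict.get? nhlMapping (PySem.Str.lower (PySem.Str.strip raw)) with
     | some c => if c ∈ s then s else s ++ [c]
     | none => s) =
    (match PySem.Dict.get? nhlMapping (PySem.Str.lower (PySem.Str.strip raw)) with
     | some c => PySem.Set.add s c
     | none => s) := by
  cases h : PySem.Dict.get? nhlMapping (PySem.Str.lower (PySem.Str.strip raw)) with
  | none => rfl
  | some c => simp [PySem.Set.add, PySem.Set.contains]

lemma nhl_fold_eq (ls : List String) (s : List String) :
    ls.foldl (fun seen raw =>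
      match PySem.Dict.get? nhlMapping (PySem.Str.lower (PySem.Str.strip raw)) with
      | some c => if c ∈ seen then seen else seen ++ [c]
      | none => seen) s =
    ls.foldl (fun pres raw =>
      match PySem.Dict.get? nhlMapping (PySem.Str.lower (PySem.Str.strip raw)) with
      | some c => PySem.Set.add pres c
      | none => pres) s := by
  induction ls generalizing s with
  | nil => simp only [List.foldl_nil]
  | cons x xs ih =>
    simp only [List.foldl_cons]
    rw [nhl_step_eq]
    exact ih _

lemma nhl_fold_good (ls : List String) (s : List String) (hs : nhlGood s) :
    nhlGood (ls.foldl (fun seen raw =>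
      match PySem.Dict.get? nhlMapping (PySem.Str.lower (PySem.Str.strip raw)) with
      | some c => if c ∈ seen then seen else seen ++ [c]
      | none => seen) s) := by
  induction ls generalizing s with
  | nil => exact hs
  | cons x xs ih =>
    simp only [List.foldl_cons]
    apply ih
    rcases nhlMapping_get? (PySem.Str.lower (PySem.Str.strip x)) with h | h | h | h <;>
      rw [h] <;>
      rcases hs with h' | h' | h' | h' | h' | h' | h' | h' | h' | h' | h' | h' | h' | h' | h' | h' <;>
      subst h' <;> simp [nhlGood]

lemma nhl_final (s : List String) (hs : nhlGood s) (hne : s ≠ []) :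
    PySem.List.sorted s (fun x => (PySem.Dict.get? nhlIdx x).getD 0) false =
    nhlOrder.filter (fun name => PySem.Set.contains s name) := by
  rcases hs with h | h | h | h | h | h | h | h | h | h | h | h | h | h | h | h <;>
    subst h <;> first | (exact absurd rfl hne) | decide

lemma nhl_main (ls : List String) (hls : ls ≠ []) :
    normalize_homework_levels (some ls) = normalize_homework_levels_alt (some ls) := by
  unfold normalize_homework_levels normalize_homework_levels_alt
  simp only [hls, if_false, PySem.Set.empty]
  rw [← nhl_fold_eq]
  have hgood := nhl_fold_good ls [] (Or.inl rfl)
  generalize (ls.foldl (fun seen raw =>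
      match PySem.Dict.get? nhlMapping (PySem.Str.lower (PySem.Str.strip raw)) with
      | some c => if c ∈ seen then seen else seen ++ [c]
      | none => seen) []) = s at hgood ⊢
  by_cases hnil : s = []
  · simp [hnil, PySem.Set.len]
  · have hlen : ¬ PySem.Set.len s = 0 := by
      simpa [PySem.Set.len, List.length_eq_zero_iff] using hnil
    simp only [hnil, hlen, if_false]
    exact nhl_final s hgood hnil

-- ===== VERDICT (by name: the statement is the Claim_ definition above) =====
theorem normalize_homework_levels_spec : Claim_equal_normalize_homework_levels := by
  intro levels _
  unfold Spec_normalize_homework_levels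
  cases levels with
  | none => rfl
  | some ls =>
    by_cases hls : ls = []
    · subst hls; rfl
    · exact (nhl_main ls hls).symm ▸ rfl
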